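-- pv_equiv track=rewrite | github.com/abbas67/honours-project | main.py | check_timetabled_days
-- ===== SOURCE A (Python) =====
-- def check_timetabled_days(modulelectures):
--
--     """ Function used to check what days have lectures and which do not."""
--     timetabled_days = {'Monday': False, 'Tuesday': False, 'Wednesday': False, 'Thursday': False, 'Friday': False}
--
--     # if a lecture is in a day then the keys day is set to True.
--     for x in modulelectures:
--
--         if x['Day'] == 'Monday':
--             timetabled_days['Monday'] = True
--
--         if x['Day'] == 'Tuesday':
--             timetabled_days['Tuesday'] = True
--
--         if x['Day'] == 'Wednesday':
--             timetabled_days['Wednesday'] = True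
--
--         if x['Day'] == 'Thursday':
--             timetabled_days['Thursday'] = True
--
--         if x['Day'] == 'Friday':
--             timetabled_days['Friday'] = True
--
--     # returning a dictionary highlighting which days have lectures.
--     return timetabled_days
-- ===== SOURCE B (Python) =====
-- def check_timetabled_days(modulelectures):
--     """Function used to check what days have lectures and which do not."""
--     result = {}
--     for day in ['Monday', 'Tuesday', 'Wednesday', 'Thursday', 'Friday']:
--         # a full per-day scan (list is built completely, so a missing 'Day'
--         # key raises KeyError just like the original)
--         result[day] = any([x['Day'] == day for x in modulelectures])
--     return result
-- ===== Notes on version B (the rewrite author's own statement) =====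
-- stated objective: alternative
-- what changed: Loop nesting is inverted: A makes one pass over the lectures mutating a five-flag dict via a five-branch if-cascade; B loops over the five fixed weekdays and for each does an independent full scan of the lectures with any(), keeping no accumulator.
import Mathlib
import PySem

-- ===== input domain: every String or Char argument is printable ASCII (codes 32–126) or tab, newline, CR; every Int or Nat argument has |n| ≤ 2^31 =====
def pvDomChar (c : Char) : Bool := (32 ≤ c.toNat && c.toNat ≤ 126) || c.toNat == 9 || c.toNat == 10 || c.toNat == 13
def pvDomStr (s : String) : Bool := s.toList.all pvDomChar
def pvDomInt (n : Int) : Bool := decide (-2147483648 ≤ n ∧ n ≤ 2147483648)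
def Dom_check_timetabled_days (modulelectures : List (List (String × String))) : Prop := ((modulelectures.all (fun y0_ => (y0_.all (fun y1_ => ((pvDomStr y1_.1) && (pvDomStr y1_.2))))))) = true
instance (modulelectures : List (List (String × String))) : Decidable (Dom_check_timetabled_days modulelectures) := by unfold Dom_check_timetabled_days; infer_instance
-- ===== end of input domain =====

-- B inverts the loop nesting: A makes one pass over the lectures mutating five
-- flags with an if-cascade; B loops over the five weekdays and fully scans the
-- lectures once per day, with no accumulator (objective: alternative).

-- ===== PORT A =====
-- x['Day'] : total form getD "" — Pre_ guarantees the key is present (KeyError excluded)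
def ctdDay (x : List (String × String)) : String :=
  ((PySem.Dict.mk x).get? "Day").getD ""

def ctdStep (d : PySem.Dict String Bool) (x : List (String × String)) : PySem.Dict String Bool :=
  let d := if ctdDay x == "Monday" then d.insert "Monday" true else d
  let d := if ctdDay x == "Tuesday" then d.insert "Tuesday" true else d
  let d := if ctdDay x == "Wednesday" then d.insert "Wednesday" true else d
  let d := if ctdDay x == "Thursday" then d.insert "Thursday" true else d
  let d := if ctdDay x == "Friday" then d.insert "Friday" true else d
  d

def check_timetabled_days (modulelectures : List (List (String × String))) : List (String × Bool) :=
  (modulelectures.foldl ctdStep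
    (PySem.Dict.mk [("Monday", false), ("Tuesday", false), ("Wednesday", false),
                    ("Thursday", false), ("Friday", false)])).items

-- ===== PORT B =====
-- result[day] = any([x['Day'] == day for x in modulelectures]), for each fixed day in order
def check_timetabled_days_alt (modulelectures : List (List (String × String))) : List (String × Bool) :=
  ["Monday", "Tuesday", "Wednesday", "Thursday", "Friday"].foldl
    (fun result day =>
      result ++ [(day, (modulelectures.map (fun x => ctdDay x == day)).any id)])
    []

-- ===== PRECONDITION & SPEC =====
-- Pre_ excludes exactly the lectures without a 'Day' key, on which Python A (and B) raise KeyError.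
def Pre_check_timetabled_days (modulelectures : List (List (String × String))) : Prop :=
  (modulelectures.all (fun x => x.any (fun p => p.1 == "Day"))) = true
instance (modulelectures : List (List (String × String))) : Decidable (Pre_check_timetabled_days modulelectures) := by unfold Pre_check_timetabled_days; infer_instance

def pvWitness_check_timetabled_days : (List (List (String × String))) :=
  ([[("Day", "Monday"), ("Time", "9")], [("Day", "Friday")]])

def Spec_check_timetabled_days (modulelectures : List (List (String × String))) (out : List (String × Bool)) : Prop := out = check_timetabled_days_alt modulelectures
instance (modulelectures : List (List (String × String))) (out : List (String × Bool)) : Decidable (Spec_check_timetabled_days modulelectures out) := by unfold Spec_check_timetabled_days; infer_instance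

-- ===== CLAIM (what is proved, stated in full; the proofs are below) =====
def Claim_equal_check_timetabled_days : Prop := ∀ (modulelectures : List (List (String × String))), Dom_check_timetabled_days modulelectures → Pre_check_timetabled_days modulelectures → Spec_check_timetabled_days modulelectures (check_timetabled_days modulelectures)

-- ===== LEMMAS AND PROOFS =====

-- One step of A's fold on the five-key literal dict, for an arbitrary day string.
lemma ctdStep_mk (m t w th f : Bool) (x : List (String × String)) :
    ctdStep (PySem.Dict.mk [("Monday", m), ("Tuesday", t), ("Wednesday", w),
                            ("Thursday", th), ("Friday", f)]) x
      = PySem.Dict.mk [("Monday", m || (ctdDay x == "Monday")),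
                       ("Tuesday", t || (ctdDay x == "Tuesday")),
                       ("Wednesday", w || (ctdDay x == "Wednesday")),
                       ("Thursday", th || (ctdDay x == "Thursday")),
                       ("Friday", f || (ctdDay x == "Friday"))] := by
  unfold ctdStep
  by_cases h1 : ctdDay x = "Monday" <;>
    by_cases h2 : ctdDay x = "Tuesday" <;>
      by_cases h3 : ctdDay x = "Wednesday" <;>
        by_cases h4 : ctdDay x = "Thursday" <;>
          by_cases h5 : ctdDay x = "Friday" <;>
            simp_all [PySem.Dict.insert, PySem.Dict.contains]

-- A's fold computes, per weekday, the disjunction of the initial flag and occurrence.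
lemma ctd_fold (ml : List (List (String × String))) (m t w th f : Bool) :
    ml.foldl ctdStep
      (PySem.Dict.mk [("Monday", m), ("Tuesday", t), ("Wednesday", w),
                      ("Thursday", th), ("Friday", f)])
      = PySem.Dict.mk [("Monday", m || ml.any (fun x => ctdDay x == "Monday")),
                       ("Tuesday", t || ml.any (fun x => ctdDay x == "Tuesday")),
                       ("Wednesday", w || ml.any (fun x => ctdDay x == "Wednesday")),
                       ("Thursday", th || ml.any (fun x => ctdDay x == "Thursday")),
                       ("Friday", f || ml.any (fun x => ctdDay x == "Friday"))] := by
  induction ml generalizing m t w th f with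
  | nil => simp
  | cons x xs ih =>
      simp only [List.foldl_cons, ctdStep_mk, ih, List.any_cons]
      simp [Bool.or_assoc]

-- B's per-day scan (any over the mapped comparison list) is an 'any' over the lectures.
lemma ctd_scan (ml : List (List (String × String))) (day : String) :
    (ml.map (fun x => ctdDay x == day)).any id = ml.any (fun x => ctdDay x == day) := by
  simp [List.any_map]

-- ===== VERDICT (by name: the statement is the Claim_ definition above) =====
theorem check_timetabled_days_spec : Claim_equal_check_timetabled_days := by
  intro ml _ _
  show check_timetabled_days ml = check_timetabled_days_alt ml
  unfold check_timetabled_days check_timetabled_days_alt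
  rw [ctd_fold]
  simp only [List.foldl_cons, List.foldl_nil, List.nil_append,
    List.cons_append, ctd_scan]
  simp
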